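-- pv_equiv track=rewrite | github.com/nlandolfi/slbo | notebooks/utils.py | split_lines_by_tasks
-- ===== SOURCE A (Python) =====
-- def split_lines_by_tasks(lines):
--     stages = []
--     stage = None
--
--     for line in lines:
--         if "STARTING TASK" in line["fmt"]:
--             stage = []
--             stages.append(stage)
--
--         if stage is not None:
--             stage.append(line)
--
--     return stages
-- ===== SOURCE B (Python) =====
-- def split_lines_by_tasks(lines):
--     lines = list(lines)
--     starts = [i for i, line in enumerate(lines) if "STARTING TASK" in line["fmt"]]
--     return [lines[s:e] for s, e in zip(starts, starts[1:] + [len(lines)])]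
-- ===== Notes on version B (the rewrite author's own statement) =====
-- stated objective: alternative
-- what changed: Replaces the stateful accumulator loop (current-stage list mutated in place) by a boundary-index pass plus slicing between consecutive marker indices.
import Mathlib
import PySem

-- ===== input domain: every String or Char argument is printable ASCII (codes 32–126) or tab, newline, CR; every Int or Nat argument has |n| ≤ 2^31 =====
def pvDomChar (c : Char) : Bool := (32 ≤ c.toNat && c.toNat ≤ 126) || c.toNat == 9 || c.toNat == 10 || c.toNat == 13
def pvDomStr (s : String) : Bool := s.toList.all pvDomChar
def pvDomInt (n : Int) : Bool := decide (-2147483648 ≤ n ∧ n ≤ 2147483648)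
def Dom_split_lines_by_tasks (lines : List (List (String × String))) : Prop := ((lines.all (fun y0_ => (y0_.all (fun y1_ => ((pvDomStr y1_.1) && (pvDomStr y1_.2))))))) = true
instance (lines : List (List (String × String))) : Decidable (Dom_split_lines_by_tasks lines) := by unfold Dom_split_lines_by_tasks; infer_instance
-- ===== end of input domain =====

-- B groups lines by slicing between marker indices instead of A's stateful accumulator loop;
-- equivalence is about the return value (A mutates nothing observable).

-- shared transliteration of Python's `"STARTING TASK" in line["fmt"]`
-- (the KeyError case — no "fmt" key — is excluded by Pre_; getD "" is unreachable inside Pre_)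
def pvFmtMarker (line : List (String × String)) : Bool :=
  PySem.Str.isIn "STARTING TASK" ((PySem.Dict.get? (PySem.Dict.mk line) "fmt").getD "")

-- ===== PORT A =====
-- Python's `stage` list is mutated in place while already appended to `stages`; modelled by
-- keeping the current stage in the Option component and flushing it into the finished list
-- at the next marker / at the end (same return value).
def pvStepA (s : List (List (List (String × String))) × Option (List (List (String × String))))
    (line : List (String × String)) :
    List (List (List (String × String))) × Option (List (List (String × String))) :=
  let s := if pvFmtMarker line then (s.1 ++ s.2.toList, some []) else s
  match s.2 with
  | some stage => (s.1, some (stage ++ [line]))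
  | none => (s.1, none)

def split_lines_by_tasks (lines : List (List (String × String))) :
    List (List (List (String × String))) :=
  let st := lines.foldl pvStepA ([], none)
  st.1 ++ st.2.toList

-- ===== PORT B =====
def split_lines_by_tasks_alt (lines : List (List (String × String))) :
    List (List (List (String × String))) :=
  let starts := ((PySem.List.enumerate lines).filter (fun p => pvFmtMarker p.2)).map Prod.fst
  (starts.zip (starts.drop 1 ++ [(lines.length : Int)])).map
    (fun p => PySem.List.slice lines (some p.1) (some p.2))

-- ===== PRECONDITION & SPEC =====
-- Pre_ excludes exactly the inputs where Python A raises KeyError: a line without an "fmt" key.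
def Pre_split_lines_by_tasks (lines : List (List (String × String))) : Prop :=
  ∀ line ∈ lines, "fmt" ∈ line.map Prod.fst
instance (lines : List (List (String × String))) : Decidable (Pre_split_lines_by_tasks lines) := by
  unfold Pre_split_lines_by_tasks; infer_instance

def pvWitness_split_lines_by_tasks : List (List (String × String)) :=
  [[("fmt", "STARTING TASK 0")], [("fmt", "loss 1.0")], [("fmt", "STARTING TASK 1")]]

def Spec_split_lines_by_tasks (lines : List (List (String × String))) (out : List (List (List (String × String)))) : Prop := out = split_lines_by_tasks_alt lines
instance (lines : List (List (String × String))) (out : List (List (List (String × String)))) : Decidable (Spec_split_lines_by_tasks lines out) := by unfold Spec_split_lines_by_tasks; infer_instance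

-- ===== CLAIM (what is proved, stated in full; the proofs are below) =====
def Claim_equal_split_lines_by_tasks : Prop := ∀ (lines : List (List (String × String))), Dom_split_lines_by_tasks lines → Pre_split_lines_by_tasks lines → Spec_split_lines_by_tasks lines (split_lines_by_tasks lines)

-- ===== LEMMAS AND PROOFS =====

abbrev pvLine := List (String × String)
abbrev pvStage := List pvLine
def pvP (x : pvLine) : Bool := !pvFmtMarker x

-- reference grouping: a stage is a marker line plus everything up to the next marker
def pvGrp : List pvLine → List pvStage
  | [] => []
  | l :: ls =>
    if pvFmtMarker l then
      (l :: ls.takeWhile pvP) :: pvGrp (ls.dropWhile pvP)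
    else pvGrp ls
termination_by ls => ls.length
decreasing_by
  · exact Nat.lt_succ_of_le (List.length_dropWhile_le _ _)
  · exact Nat.lt_succ_self _

-- Nat-index reformulation of B
def pvStartsN : List pvLine → List Nat
  | [] => []
  | l :: ls => (if pvFmtMarker l then [0] else []) ++ (pvStartsN ls).map (· + 1)

def pvSliceN (xs : List pvLine) (s e : Nat) : List pvLine := (xs.drop s).take (e - s)

def pvAltN (lines : List pvLine) : List pvStage :=
  let st := pvStartsN lines
  (st.zip (st.drop 1 ++ [lines.length])).map (fun p => pvSliceN lines p.1 p.2)

-- ---- A = pvGrp ----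
def pvFin (s : List pvStage × Option pvStage) : List pvStage := s.1 ++ s.2.toList

lemma lemA_some : ∀ (ls : List pvLine) (fin : List pvStage) (cur : pvStage),
    pvFin (ls.foldl pvStepA (fin, some cur)) =
      fin ++ ((cur ++ ls.takeWhile pvP) :: pvGrp (ls.dropWhile pvP)) := by
  intro ls
  induction ls with
  | nil => intro fin cur; simp [pvFin, pvGrp]
  | cons x xs ih =>
    intro fin cur
    by_cases hm : pvFmtMarker x
    · have hstep : pvStepA (fin, some cur) x = (fin ++ [cur], some [x]) := by
        simp [pvStepA, hm]
      rw [List.foldl_cons, hstep, ih]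
      simp [pvP, pvGrp, hm]
    · have hstep : pvStepA (fin, some cur) x = (fin, some (cur ++ [x])) := by
        simp [pvStepA, hm]
      rw [List.foldl_cons, hstep, ih]
      simp [pvP, hm]
lemma lemA : ∀ lines, split_lines_by_tasks lines = pvGrp lines := by
  intro lines
  induction lines with
  | nil => simp [split_lines_by_tasks, pvGrp]
  | cons l ls ih =>
    show pvFin ((l :: ls).foldl pvStepA ([], none)) = _
    by_cases hm : pvFmtMarker l
    · have hstep : pvStepA ([], none) l = ([], some [l]) := by simp [pvStepA, hm]
      rw [List.foldl_cons, hstep, lemA_some]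
      simp only [pvGrp]
      simp [hm]
    · have hstep : pvStepA ([], none) l = ([], none) := by simp [pvStepA, hm]
      rw [List.foldl_cons, hstep]
      simp only [pvGrp]
      simp [hm]
      exact ih

-- ---- B = pvAltN ----
lemma starts_bridge : ∀ (lines : List pvLine) (n : Int),
    ((PySem.List.enumerate lines n).filter (fun p => pvFmtMarker p.2)).map Prod.fst =
      (pvStartsN lines).map (fun k : Nat => (k : Int) + n) := by
  intro lines
  induction lines with
  | nil => intro n; rfl
  | cons l ls ih =>
    intro n
    have key : ((pvStartsN ls).map (· + 1)).map (fun k : Nat => (k : Int) + n) =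
        (pvStartsN ls).map (fun k : Nat => (k : Int) + (n + 1)) := by
      rw [List.map_map]
      apply List.map_congr_left
      intro k _
      simp only [Function.comp]
      push_cast
      ring
    rw [PySem.List.enumerate, pvStartsN]
    by_cases hm : pvFmtMarker l
    · rw [List.filter_cons_of_pos (by simpa using hm), List.map_cons,
        List.map_append, key, ih (n + 1)]
      simp [hm]
    · rw [List.filter_cons_of_neg (by simpa using hm),
        List.map_append, key, ih (n + 1)]
      simp [hm]

lemma lemB : ∀ lines, split_lines_by_tasks_alt lines = pvAltN lines := by
  intro lines
  rw [split_lines_by_tasks_alt, pvAltN]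
  have hs := starts_bridge lines 0
  simp only [Int.add_zero] at hs
  rw [hs]
  have hcast : ((pvStartsN lines).map (fun k : Nat => (k : Int))).drop 1 ++ [((lines.length : Nat) : Int)] =
      ((pvStartsN lines).drop 1 ++ [lines.length]).map (fun k : Nat => (k : Int)) := by
    rw [List.map_append, List.map_drop]
    simp
  rw [hcast, List.zip_map, List.map_map]
  apply List.map_congr_left
  intro p _
  simp [Prod.map, PySem.List.slice_natCast, pvSliceN]

-- ---- pvAltN = pvGrp ----
lemma grp_dropWhile : ∀ ls, pvGrp (ls.dropWhile pvP) = pvGrp ls := by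
  intro ls
  induction ls with
  | nil => rfl
  | cons x xs ih =>
    by_cases hm : pvFmtMarker x
    · simp [pvP, hm]
    · rw [List.dropWhile_cons]
      simp only [pvP, hm]
      rw [pvGrp]
      simp [hm, ih]

lemma startsN_nil : ∀ ls, pvStartsN ls = [] → ls.takeWhile pvP = ls := by
  intro ls
  induction ls with
  | nil => intro _; rfl
  | cons x xs ih =>
    intro h
    rw [pvStartsN] at h
    by_cases hm : pvFmtMarker x
    · simp [hm] at h
    · simp [hm] at h
      simp [pvP, hm, ih h]

lemma startsN_head : ∀ (ls : List pvLine) (k : Nat) (ks : List Nat),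
    pvStartsN ls = k :: ks → ls.take k = ls.takeWhile pvP := by
  intro ls
  induction ls with
  | nil => intro k ks h; simp [pvStartsN] at h
  | cons x xs ih =>
    intro k ks h
    rw [pvStartsN] at h
    by_cases hm : pvFmtMarker x
    · simp [hm] at h
      obtain ⟨hk, _⟩ := h
      simp [← hk, pvP, hm]
    · simp [hm] at h
      cases hst : pvStartsN xs with
      | nil => rw [hst] at h; simp at h
      | cons k' ks' =>
        rw [hst] at h
        simp at h
        obtain ⟨hk, _⟩ := h
        rw [← hk]
        simp [List.take_succ_cons, pvP, hm]
        exact ih k' ks' hst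

lemma zip_shift (a b : List Nat) (xs : List pvLine) (l : pvLine) :
    ((a.map (· + 1)).zip (b.map (· + 1))).map (fun p => pvSliceN (l :: xs) p.1 p.2) =
      (a.zip b).map (fun p => pvSliceN xs p.1 p.2) := by
  rw [List.zip_map, List.map_map]
  apply List.map_congr_left
  intro p _
  simp [Prod.map, pvSliceN, Nat.add_sub_add_right]

lemma pairs_shift (st : List Nat) (L : Nat) (xs : List pvLine) (l : pvLine) :
    (((st.map (· + 1)).zip ((st.map (· + 1)).drop 1 ++ [L + 1])).map
        (fun p => pvSliceN (l :: xs) p.1 p.2)) =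
      ((st.zip (st.drop 1 ++ [L])).map (fun p => pvSliceN xs p.1 p.2)) := by
  have h : (st.map (· + 1)).drop 1 ++ [L + 1] = (st.drop 1 ++ [L]).map (· + 1) := by
    rw [List.map_append, List.map_drop]
    rfl
  rw [h, zip_shift]

lemma lemAltN : ∀ lines, pvAltN lines = pvGrp lines := by
  intro lines
  induction lines with
  | nil => simp [pvAltN, pvStartsN, pvGrp]
  | cons l ls ih =>
    by_cases hm : pvFmtMarker l
    · simp only [pvGrp, hm, if_pos]
      rw [grp_dropWhile ls, ← ih]
      show pvAltN (l :: ls) = (l :: ls.takeWhile pvP) :: pvAltN ls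
      rw [pvAltN, pvAltN]
      simp only [pvStartsN, hm, if_pos, List.singleton_append, List.length_cons]
      cases hst : pvStartsN ls with
      | nil =>
        simp [pvSliceN, List.take_of_length_le, startsN_nil ls hst]
      | cons k ks =>
        simp only [List.map_cons, List.drop_succ_cons, List.drop_zero,
          List.cons_append]
        rw [List.zip_cons_cons, List.map_cons]
        have h1 : pvSliceN (l :: ls) 0 (k + 1) = l :: ls.takeWhile pvP := by
          rw [pvSliceN, List.drop_zero, Nat.sub_zero, List.take_succ_cons,
            startsN_head ls k ks hst]
        have h2 := pairs_shift (k :: ks) ls.length ls l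
        simp only [List.map_cons, List.drop_succ_cons, List.drop_zero] at h2
        rw [h1, h2]
    · simp only [pvGrp, hm, Bool.false_eq_true, if_false]
      rw [← ih]
      show pvAltN (l :: ls) = pvAltN ls
      rw [pvAltN, pvAltN]
      simp only [pvStartsN, hm, Bool.false_eq_true, if_false, List.nil_append,
        List.length_cons]
      exact pairs_shift (pvStartsN ls) ls.length ls l

-- ===== VERDICT (by name: the statement is the Claim_ definition above) =====
theorem split_lines_by_tasks_spec : Claim_equal_split_lines_by_tasks := by
  intro lines _ _
  unfold Spec_split_lines_by_tasks
  rw [lemA, lemB, lemAltN]
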